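-- pv_equiv track=rewrite | github.com/alexwday/aegis | src/aegis/etls/bank_earnings_report/retrieval/rts.py | get_expanded_page_set
-- ===== SOURCE A (Python) =====
-- from typing import Any, Dict, List, Optional, Set
--
-- def get_expanded_page_set(page_numbers: Set[int], max_gap: int = 5) -> Set[int]:
--     """
--     Expand page set with ±1 context and fill gaps ≤ max_gap.
--
--     Args:
--         page_numbers: Set of page numbers from relevant chunks
--         max_gap: Maximum gap size to fill (default 5)
--
--     Returns:
--         Expanded set of page numbers
--     """
--     if not page_numbers:
--         return set()
--
--     # Step 1: Add ±1 page context
--     expanded = set()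
--     for page in page_numbers:
--         expanded.add(page - 1)
--         expanded.add(page)
--         expanded.add(page + 1)
--
--     # Remove invalid page numbers (< 1)
--     expanded = {p for p in expanded if p >= 1}
--
--     # Step 2: Fill gaps ≤ max_gap
--     if len(expanded) < 2:
--         return expanded
--
--     sorted_pages = sorted(expanded)
--     filled = set(sorted_pages)
--
--     for i in range(len(sorted_pages) - 1):
--         current = sorted_pages[i]
--         next_page = sorted_pages[i + 1]
--         gap = next_page - current - 1
--
--         if 0 < gap <= max_gap:
--             # Fill the gap
--             for page in range(current + 1, next_page):
--                 filled.add(page)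
--
--     return filled
-- ===== SOURCE B (Python) =====
-- def get_expanded_page_set(page_numbers, max_gap=5):
--     """Expand page set with +-1 context and fill gaps <= max_gap (cluster-based)."""
--     if not page_numbers:
--         return set()
--
--     # +-1 context, dropping invalid pages (< 1), in one comprehension
--     expanded = {q for p in page_numbers for q in (p - 1, p, p + 1) if q >= 1}
--
--     if len(expanded) < 2:
--         return expanded
--
--     pages = sorted(expanded)
--     result = set(pages)
--
--     # Group sorted pages into maximal clusters whose consecutive distance
--     # is <= max_gap + 1, then add each cluster's full contiguous range.
--     clusters = []
--     start = prev = pages[0]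
--     for page in pages[1:]:
--         if page - prev > max_gap + 1:
--             clusters.append((start, prev))
--             start = page
--         prev = page
--     clusters.append((start, prev))
--
--     for s, e in clusters:
--         for q in range(s, e + 1):
--             result.add(q)
--
--     return result
-- ===== Notes on version B (the rewrite author's own statement) =====
-- stated objective: alternative
-- what changed: B replaces A's pairwise gap-patching loop (which inspects each consecutive sorted pair and fills that gap into the set) by grouping the sorted expanded pages into maximal clusters whose consecutive distance is at most max_gap+1 and then emitting each cluster's full contiguous range.
import Mathlib
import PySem

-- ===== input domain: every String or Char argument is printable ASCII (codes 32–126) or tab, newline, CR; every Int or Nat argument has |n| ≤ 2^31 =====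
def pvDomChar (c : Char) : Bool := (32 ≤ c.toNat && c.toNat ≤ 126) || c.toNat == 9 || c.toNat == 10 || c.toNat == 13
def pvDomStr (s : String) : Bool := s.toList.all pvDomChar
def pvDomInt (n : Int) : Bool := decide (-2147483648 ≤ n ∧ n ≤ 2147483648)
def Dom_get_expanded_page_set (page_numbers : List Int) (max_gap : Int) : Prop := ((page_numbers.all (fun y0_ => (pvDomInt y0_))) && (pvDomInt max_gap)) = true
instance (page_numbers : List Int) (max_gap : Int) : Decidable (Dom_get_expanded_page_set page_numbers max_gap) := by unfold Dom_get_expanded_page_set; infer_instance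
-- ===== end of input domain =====

-- B re-implements the gap-filling pass as a single sort-then-cluster sweep emitting whole
-- contiguous ranges per cluster (objective: alternative decomposition, same exact result).

-- ===== PORT A =====
def get_expanded_page_set (page_numbers : List Int) (max_gap : Int) : List Int :=
  if page_numbers = [] then []
  else
    -- Step 1: add ±1 page context
    let expanded0 : PySem.Set Int :=
      page_numbers.foldl
        (fun s p => PySem.Set.add (PySem.Set.add (PySem.Set.add s (p - 1)) p) (p + 1))
        PySem.Set.empty
    -- remove invalid page numbers (< 1)
    let expanded : PySem.Set Int := PySem.Set.ofList (expanded0.filter (fun p => decide (1 ≤ p)))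
    if PySem.Set.len expanded < 2 then expanded
    else
      let sorted_pages := PySem.List.sorted expanded (fun x => x)
      let filled : PySem.Set Int := PySem.Set.ofList sorted_pages
      (PySem.List.pyRange 0 (PySem.List.len sorted_pages - 1) 1).foldl
        (fun f i =>
          let current := PySem.List.pyGetD sorted_pages i 0
          let next_page := PySem.List.pyGetD sorted_pages (i + 1) 0
          let gap := next_page - current - 1
          if 0 < gap ∧ gap ≤ max_gap then
            (PySem.List.pyRange (current + 1) next_page 1).foldl PySem.Set.add f
          else f)
        filled

-- ===== PORT B =====
def get_expanded_page_set_alt (page_numbers : List Int) (max_gap : Int) : List Int :=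
  if page_numbers = [] then []
  else
    -- ±1 context, dropping pages < 1, in one comprehension
    let expanded : PySem.Set Int :=
      PySem.Set.ofList ((page_numbers.flatMap (fun p => [p - 1, p, p + 1])).filter
        (fun q => decide (1 ≤ q)))
    if PySem.Set.len expanded < 2 then expanded
    else
      let pages := PySem.List.sorted expanded (fun x => x)
      let result : PySem.Set Int := PySem.Set.ofList pages
      let first := PySem.List.pyGetD pages 0 0
      -- group sorted pages into maximal clusters (consecutive distance ≤ max_gap + 1)
      let st := (PySem.List.slice pages (some 1) none).foldl
        (fun (st : Int × Int × List (Int × Int)) page =>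
          if max_gap + 1 < page - st.2.1 then (page, page, st.2.2 ++ [(st.1, st.2.1)])
          else (st.1, page, st.2.2))
        (first, first, [])
      let clusters := st.2.2 ++ [(st.1, st.2.1)]
      -- add each cluster's full contiguous range
      clusters.foldl
        (fun r c => (PySem.List.pyRange c.1 (c.2 + 1) 1).foldl PySem.Set.add r)
        result

-- ===== PRECONDITION & SPEC =====
def Spec_get_expanded_page_set (page_numbers : List Int) (max_gap : Int) (out : List Int) : Prop := out = get_expanded_page_set_alt page_numbers max_gap
instance (page_numbers : List Int) (max_gap : Int) (out : List Int) : Decidable (Spec_get_expanded_page_set page_numbers max_gap out) := by unfold Spec_get_expanded_page_set; infer_instance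

-- ===== CLAIM (what is proved, stated in full; the proofs are below) =====
def Claim_equal_get_expanded_page_set : Prop := ∀ (page_numbers : List Int) (max_gap : Int), Dom_get_expanded_page_set page_numbers max_gap → Spec_get_expanded_page_set page_numbers max_gap (get_expanded_page_set page_numbers max_gap)

-- ===== LEMMAS AND PROOFS =====

-- structural form of A's index-pair gap-filling loop
def pvFillBody (g : Int) (f : PySem.Set Int) (c n : Int) : PySem.Set Int :=
  let gap := n - c - 1
  if 0 < gap ∧ gap ≤ g then (PySem.List.pyRange (c + 1) n 1).foldl PySem.Set.add f else f

def pvFA (g : Int) : Int → List Int → PySem.Set Int → PySem.Set Int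
  | _, [], f => f
  | x, p :: rest, f => pvFA g p rest (pvFillBody g f x p)

-- B's cluster-scan step and the flat page list its clusters emit
def pvStep (g : Int) (st : Int × Int × List (Int × Int)) (page : Int) : Int × Int × List (Int × Int) :=
  if g + 1 < page - st.2.1 then (page, page, st.2.2 ++ [(st.1, st.2.1)]) else (st.1, page, st.2.2)

def pvEmit (st : Int × Int × List (Int × Int)) : List Int :=
  (st.2.2 ++ [(st.1, st.2.1)]).flatMap (fun c => PySem.List.pyRange c.1 (c.2 + 1) 1)

def pvR (g : Int) : Int → Int → List Int → List Int
  | s, x, [] => PySem.List.pyRange s (x + 1) 1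
  | s, x, p :: rest =>
      if g + 1 < p - x then PySem.List.pyRange s (x + 1) 1 ++ pvR g p p rest
      else pvR g s p rest

-- the fresh pages both programs append after the sorted pages
def pvGapFill (g : Int) : Int → List Int → List Int
  | _, [] => []
  | x, p :: rest =>
      (if 0 < p - x - 1 ∧ p - x - 1 ≤ g then PySem.List.pyRange (x + 1) p 1 else []) ++
        pvGapFill g p rest

lemma pv_foldl_add_flatMap {α β : Type} [BEq α] (f : β → List α) :
    ∀ (l : List β) (s : PySem.Set α),
      (l.flatMap f).foldl PySem.Set.add s = l.foldl (fun s b => (f b).foldl PySem.Set.add s) s := by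
  intro l
  induction l with
  | nil => intro s; rfl
  | cons a t ih => intro s; simp [List.flatMap_cons, List.foldl_append, ih]

lemma pv_ofList_filter (p : Int → Bool) :
    ∀ xs : List Int, PySem.Set.ofList (xs.filter p) = (PySem.Set.ofList xs).filter p := by
  intro xs
  induction xs with
  | nil => rfl
  | cons x t ih =>
    by_cases hx : p x = true
    · simp only [List.filter_cons, hx, if_true, PySem.Set.ofList_cons, ih, PySem.Set.discard,
        List.filter_filter]
      refine congrArg (x :: ·) (List.filter_congr ?_)
      intro a _; rw [Bool.and_comm]
    · simp only [List.filter_cons, hx, PySem.Set.ofList_cons, ih, PySem.Set.discard,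
        List.filter_filter, Bool.false_eq_true, ite_false]
      refine (List.filter_congr ?_).symm
      intro a _
      by_cases hax : a = x
      · subst hax; simp [hx]
      · simp [hax]

lemma pv_not_mem_between {P : List Int} {x q pg : Int} {rest : List Int}
    (hP : P.Pairwise (· < ·)) (hsuf : (x :: pg :: rest) <:+ P)
    (h1 : x < q) (h2 : q < pg) : q ∉ P := by
  obtain ⟨pre, rfl⟩ := hsuf
  rw [List.pairwise_append] at hP
  obtain ⟨-, htl, hcross⟩ := hP
  intro hq
  rcases List.mem_append.mp hq with hq | hq
  · exact absurd (hcross q hq x (by simp)) (by omega)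
  · rcases List.mem_cons.mp hq with rfl | hq
    · omega
    rcases List.mem_cons.mp hq with rfl | hq
    · omega
    · have h3 := (List.pairwise_cons.mp htl).2
      have := (List.pairwise_cons.mp h3).1 q hq
      omega

lemma pv_idx_nat (g : Int) :
    ∀ (xs : List Int) (x : Int) (f : PySem.Set Int),
      (List.range xs.length).foldl
        (fun f (k : Nat) => pvFillBody g f ((x :: xs).getD k 0) ((x :: xs).getD (k + 1) 0)) f
      = pvFA g x xs f := by
  intro xs
  induction xs with
  | nil => intro x f; rfl
  | cons p t ih =>
    intro x f
    rw [List.length_cons, List.range_succ_eq_map, List.foldl_cons, List.foldl_map]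
    simp only [List.getD_cons_zero, List.getD_cons_succ]
    exact ih p (pvFillBody g f x p)

lemma pv_idx_loop (g : Int) (xs : List Int) (x : Int) (f : PySem.Set Int) :
    (PySem.List.pyRange 0 (PySem.List.len (x :: xs) - 1) 1).foldl
        (fun f i =>
          let current := PySem.List.pyGetD (x :: xs) i 0
          let next_page := PySem.List.pyGetD (x :: xs) (i + 1) 0
          let gap := next_page - current - 1
          if 0 < gap ∧ gap ≤ g then
            (PySem.List.pyRange (current + 1) next_page 1).foldl PySem.Set.add f
          else f)
        f = pvFA g x xs f := by
  have hlen : PySem.List.len (x :: xs) - 1 = (xs.length : Int) := by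
    simp [PySem.List.len]
  rw [hlen, PySem.List.pyRange_one, List.foldl_map]
  have : ((xs.length : Int) - 0).toNat = xs.length := by omega
  rw [this]
  rw [← pv_idx_nat g xs x f]
  refine PySem.List.foldl_congr_mem _ _ _ _ ?_
  intro f' k hk
  show pvFillBody g f' (PySem.List.pyGetD (x :: xs) (0 + (k : Int)) 0)
      (PySem.List.pyGetD (x :: xs) ((0 + (k : Int)) + 1) 0) = _
  rw [show (0 : Int) + (k : Int) = ((k : Nat) : Int) by ring]
  rw [show ((k : Nat) : Int) + 1 = ((k + 1 : Nat) : Int) by push_cast; ring]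
  rw [PySem.List.pyGetD_natCast, PySem.List.pyGetD_natCast]

lemma pv_fa_char (g : Int) {P : List Int} (hP : P.Pairwise (· < ·)) :
    ∀ (rest : List Int) (x : Int) (f : PySem.Set Int),
      (x :: rest) <:+ P → (∀ q ∈ f, q ≤ x ∨ q ∈ P) →
      pvFA g x rest f = f ++ pvGapFill g x rest := by
  intro rest
  induction rest with
  | nil => intro x f _ _; simp [pvFA, pvGapFill]
  | cons p rest ih =>
    intro x f hsuf hf
    have hpair : (x :: p :: rest).Pairwise (· < ·) := hP.sublist hsuf.sublist
    have hxp : x < p := (List.pairwise_cons.mp hpair).1 p (by simp)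
    have hsuf' : (p :: rest) <:+ P := (List.suffix_cons x (p :: rest)).trans hsuf
    show pvFA g p rest (pvFillBody g f x p) = f ++ pvGapFill g x (p :: rest)
    by_cases hc : 0 < p - x - 1 ∧ p - x - 1 ≤ g
    · have hfresh : ∀ q ∈ PySem.List.pyRange (x + 1) p 1, q ∉ f := by
        intro q hq hqf
        have hb := (PySem.List.mem_pyRange_one).mp hq
        rcases hf q hqf with h | h
        · omega
        · exact pv_not_mem_between hP hsuf (by omega) (by omega) h
      have hf' : pvFillBody g f x p = f ++ PySem.List.pyRange (x + 1) p 1 := by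
        show (if _ then _ else _) = _
        rw [if_pos hc]
        exact PySem.Set.update_eq_append_of_disjoint f _ (PySem.List.nodup_pyRange_one _ _) hfresh
      rw [hf', ih p _ hsuf' ?_]
      · show _ = f ++ ((if _ then _ else _) ++ pvGapFill g p rest)
        rw [if_pos hc, List.append_assoc]
      · intro q hq
        rcases List.mem_append.mp hq with h | h
        · rcases hf q h with h | h
          · exact Or.inl (by omega)
          · exact Or.inr h
        · exact Or.inl (by have := (PySem.List.mem_pyRange_one).mp h; omega)
    · have hf' : pvFillBody g f x p = f := by
        show (if _ then _ else _) = _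
        rw [if_neg hc]
      rw [hf', ih p _ hsuf' ?_]
      · show _ = f ++ ((if _ then _ else _) ++ pvGapFill g p rest)
        rw [if_neg hc, List.nil_append]
      · intro q hq
        rcases hf q hq with h | h
        · exact Or.inl (by omega)
        · exact Or.inr h

lemma pv_fold_clusters (g : Int) :
    ∀ (rest : List Int) (s x : Int) (cls : List (Int × Int)),
      pvEmit (rest.foldl (pvStep g) (s, x, cls))
      = cls.flatMap (fun c => PySem.List.pyRange c.1 (c.2 + 1) 1) ++ pvR g s x rest := by
  intro rest
  induction rest with
  | nil => intro s x cls; simp [pvR, pvEmit]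
  | cons p rest ih =>
    intro s x cls
    rw [List.foldl_cons]
    by_cases hc : g + 1 < p - x
    · have hstep : pvStep g (s, x, cls) p = (p, p, cls ++ [(s, x)]) := by
        simp [pvStep, hc]
      rw [hstep, ih p p (cls ++ [(s, x)]), List.flatMap_append]
      show _ = _ ++ (if g + 1 < p - x then _ else _)
      rw [if_pos hc, List.append_assoc]
      simp
    · have hstep : pvStep g (s, x, cls) p = (s, p, cls) := by
        simp [pvStep, hc]
      rw [hstep, ih s p cls]
      show _ = _ ++ (if g + 1 < p - x then _ else _)
      rw [if_neg hc]

lemma pvR_lb (g : Int) :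
    ∀ (rest : List Int) (x s : Int), s ≤ x → (x :: rest).Pairwise (· < ·) →
      ∀ q ∈ pvR g s x rest, s ≤ q := by
  intro rest
  induction rest with
  | nil =>
    intro x s hsx _ q hq
    have := PySem.List.mem_pyRange_one.mp hq; omega
  | cons p rest ih =>
    intro x s hsx hpair q hq
    have hxp : x < p := (List.pairwise_cons.mp hpair).1 p (by simp)
    have hpair' : (p :: rest).Pairwise (· < ·) := (List.pairwise_cons.mp hpair).2
    show s ≤ q
    by_cases hc : g + 1 < p - x
    · rw [pvR, if_pos hc] at hq
      rcases List.mem_append.mp hq with h | h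
      · have := PySem.List.mem_pyRange_one.mp h; omega
      · have := ih p p le_rfl hpair' q h; omega
    · rw [pvR, if_neg hc] at hq
      exact ih p s (by omega) hpair' q hq

lemma pvR_pairwise (g : Int) :
    ∀ (rest : List Int) (x s : Int), s ≤ x → (x :: rest).Pairwise (· < ·) →
      (pvR g s x rest).Pairwise (· < ·) := by
  intro rest
  induction rest with
  | nil => intro x s _ _; exact PySem.List.pairwise_lt_pyRange_one _ _
  | cons p rest ih =>
    intro x s hsx hpair
    have hxp : x < p := (List.pairwise_cons.mp hpair).1 p (by simp)
    have hpair' : (p :: rest).Pairwise (· < ·) := (List.pairwise_cons.mp hpair).2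
    by_cases hc : g + 1 < p - x
    · rw [pvR, if_pos hc]
      rw [List.pairwise_append]
      refine ⟨PySem.List.pairwise_lt_pyRange_one _ _, ih p p le_rfl hpair', ?_⟩
      intro a ha b hb
      have h1 := PySem.List.mem_pyRange_one.mp ha
      have h2 := pvR_lb g rest p p le_rfl hpair' b hb
      omega
    · rw [pvR, if_neg hc]
      exact ih p s (by omega) hpair'

lemma pvR_filter (g : Int) {P : List Int} (hP : P.Pairwise (· < ·)) :
    ∀ (rest : List Int) (x s : Int), (x :: rest) <:+ P → s ≤ x →
      (pvR g s x rest).filter (fun q => !(PySem.Set.contains P q)) =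
        (PySem.List.pyRange s (x + 1) 1).filter (fun q => !(PySem.Set.contains P q)) ++
          pvGapFill g x rest := by
  intro rest
  induction rest with
  | nil => intro x s _ _; simp [pvR, pvGapFill]
  | cons p rest ih =>
    intro x s hsuf hsx
    have hpair : (x :: p :: rest).Pairwise (· < ·) := hP.sublist hsuf.sublist
    have hxp : x < p := (List.pairwise_cons.mp hpair).1 p (by simp)
    have hsuf' : (p :: rest) <:+ P := (List.suffix_cons x (p :: rest)).trans hsuf
    have hpP : p ∈ P := hsuf'.subset (by simp)
    have hbetween : ∀ q, x < q → q < p → q ∉ P := fun q h1 h2 =>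
      pv_not_mem_between hP hsuf h1 h2
    by_cases hc : g + 1 < p - x
    · rw [pvR, if_pos hc, List.filter_append, ih p p hsuf' le_rfl]
      have hsingle : (PySem.List.pyRange p (p + 1) 1).filter
          (fun q => !(PySem.Set.contains P q)) = [] := by
        rw [PySem.List.pyRange_one_singleton]
        simp [List.filter, hpP]
      rw [hsingle, List.nil_append]
      show _ = _ ++ ((if 0 < p - x - 1 ∧ p - x - 1 ≤ g then _ else _) ++ pvGapFill g p rest)
      rw [if_neg (by omega), List.nil_append]
    · rw [pvR, if_neg hc, ih p s hsuf' (by omega)]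
      rw [PySem.List.pyRange_one_append s (x + 1) (p + 1) (by omega) (by omega),
        List.filter_append]
      have hsplit : (PySem.List.pyRange (x + 1) (p + 1) 1).filter
            (fun q => !(PySem.Set.contains P q))
          = (PySem.List.pyRange (x + 1) p 1) := by
        rw [PySem.List.pyRange_one_append (x + 1) p (p + 1) (by omega) (by omega),
          List.filter_append, PySem.List.pyRange_one_singleton]
        have h1 : (PySem.List.pyRange (x + 1) p 1).filter
            (fun q => !(PySem.Set.contains P q)) = PySem.List.pyRange (x + 1) p 1 := by
          apply List.filter_eq_self.mpr
          intro q hq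
          have hb := PySem.List.mem_pyRange_one.mp hq
          have : q ∉ P := hbetween q (by omega) (by omega)
          simp [this]
        have h2 : ([p] : List Int).filter (fun q => !(PySem.Set.contains P q)) = [] := by
          simp [List.filter, hpP]
        rw [h1, h2, List.append_nil]
      rw [hsplit]
      show _ = _ ++ ((if 0 < p - x - 1 ∧ p - x - 1 ≤ g then _ else _) ++ pvGapFill g p rest)
      by_cases hg : 0 < p - x - 1
      · rw [if_pos ⟨hg, by omega⟩, List.append_assoc]
      · rw [if_neg (by omega), List.nil_append]
        have : PySem.List.pyRange (x + 1) p 1 = [] := PySem.List.pyRange_one_eq_nil (by omega)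
        rw [this, List.append_nil]

-- ===== VERDICT (by name: the statement is the Claim_ definition above) =====
set_option maxHeartbeats 1000000 in
theorem get_expanded_page_set_spec : Claim_equal_get_expanded_page_set := by
  intro pn g _
  show get_expanded_page_set pn g = get_expanded_page_set_alt pn g
  by_cases hpn : pn = []
  · simp [get_expanded_page_set, get_expanded_page_set_alt, hpn]
  · rw [get_expanded_page_set, get_expanded_page_set_alt, if_neg hpn, if_neg hpn]
    have he0 : pn.foldl
        (fun s p => PySem.Set.add (PySem.Set.add (PySem.Set.add s (p - 1)) p) (p + 1))
        PySem.Set.empty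
        = PySem.Set.ofList (pn.flatMap (fun p => [p - 1, p, p + 1])) := by
      rw [PySem.Set.ofList_eq_foldl (pn.flatMap (fun p => [p - 1, p, p + 1]))]
      exact (pv_foldl_add_flatMap (fun p => [p - 1, p, p + 1]) pn PySem.Set.empty).symm
    simp only [he0]
    have hEB : PySem.Set.ofList
        ((PySem.Set.ofList (pn.flatMap (fun p => [p - 1, p, p + 1]))).filter
          (fun p => decide (1 ≤ p)))
        = PySem.Set.ofList ((pn.flatMap (fun p => [p - 1, p, p + 1])).filter
          (fun q => decide (1 ≤ q))) := by
      rw [← pv_ofList_filter]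
      exact PySem.Set.ofList_ofList _
    simp only [hEB]
    by_cases hlen : (PySem.Set.ofList (List.filter (fun p => decide (1 ≤ p))
        (List.flatMap (fun p => [p - 1, p, p + 1]) pn))).len < 2
    · rw [if_pos hlen, if_pos hlen]
    · rw [if_neg hlen, if_neg hlen]
      have hpw : (PySem.List.sorted (PySem.Set.ofList (List.filter (fun p => decide (1 ≤ p))
          (List.flatMap (fun p => [p - 1, p, p + 1]) pn))) (fun x => x)).Pairwise (· < ·) :=
        PySem.List.sorted_ofList_pairwise_lt _
      set pages := PySem.List.sorted (PySem.Set.ofList (List.filter (fun p => decide (1 ≤ p))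
          (List.flatMap (fun p => [p - 1, p, p + 1]) pn))) (fun x => x) with hpages
      have hnd : pages.Nodup := hpw.imp (fun h => ne_of_lt h)
      have hofl : PySem.Set.ofList pages = pages := PySem.Set.ofList_eq_self_of_nodup _ hnd
      have hne : pages ≠ [] := by
        intro h
        have hl : pages.length = 0 := by rw [h]; rfl
        rw [hpages, PySem.List.length_sorted] at hl
        simp [PySem.Set.len] at hlen
        omega
      obtain ⟨x, rest, hxr⟩ := List.exists_cons_of_ne_nil hne
      rw [hofl]
      clear hofl hne hpages
      clear_value pages
      subst hxr
      have hfirst : PySem.List.pyGetD (x :: rest) 0 0 = x := by simp [pysem]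
      have hslice : PySem.List.slice (x :: rest) (some 1) = rest := by
        rw [PySem.List.slice_from _ (by norm_num : (0 : Int) ≤ 1)]
        simp
      rw [hfirst, hslice]
      have hsufr : (x :: rest) <:+ (x :: rest) := List.suffix_refl _
      calc List.foldl
            (fun f i =>
              if 0 < PySem.List.pyGetD (x :: rest) (i + 1) 0
                    - PySem.List.pyGetD (x :: rest) i 0 - 1 ∧
                  PySem.List.pyGetD (x :: rest) (i + 1) 0
                    - PySem.List.pyGetD (x :: rest) i 0 - 1 ≤ g then
                List.foldl PySem.Set.add f
                  (PySem.List.pyRange (PySem.List.pyGetD (x :: rest) i 0 + 1)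
                    (PySem.List.pyGetD (x :: rest) (i + 1) 0))
              else f)
            (x :: rest) (PySem.List.pyRange 0 (PySem.List.len (x :: rest) - 1))
          = pvFA g x rest (x :: rest) := pv_idx_loop g rest x (x :: rest)
        _ = (x :: rest) ++ pvGapFill g x rest :=
            pv_fa_char g hpw rest x (x :: rest) hsufr (fun q hq => Or.inr hq)
        _ = (x :: rest) ++
              ((PySem.List.pyRange x (x + 1) 1).filter
                  (fun q => !(PySem.Set.contains (x :: rest) q)) ++ pvGapFill g x rest) := by
            rw [PySem.List.pyRange_one_singleton]
            simp [List.filter]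
        _ = (x :: rest) ++
              (pvR g x x rest).filter (fun q => !(PySem.Set.contains (x :: rest) q)) := by
            rw [pvR_filter g hpw rest x x hsufr le_rfl]
        _ = (x :: rest) ++
              (PySem.Set.ofList (pvR g x x rest)).filter
                (fun q => !(PySem.Set.contains (x :: rest) q)) := by
            rw [PySem.Set.ofList_eq_self_of_nodup _
              ((pvR_pairwise g rest x x le_rfl hpw).imp (fun h => ne_of_lt h))]
        _ = PySem.Set.update (x :: rest) (pvR g x x rest) :=
            (PySem.Set.update_eq_append_filter _ _).symm
        _ = (pvEmit (rest.foldl (pvStep g) (x, x, []))).foldl PySem.Set.add (x :: rest) := by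
            rw [pv_fold_clusters g rest x x []]
            rfl
        _ = List.foldl (fun r c => List.foldl PySem.Set.add r (PySem.List.pyRange c.1 (c.2 + 1)))
              (x :: rest)
              ((rest.foldl (pvStep g) (x, x, [])).2.2 ++
                [((rest.foldl (pvStep g) (x, x, [])).1,
                  (rest.foldl (pvStep g) (x, x, [])).2.1)]) :=
            by
              simp only [pvEmit]
              exact pv_foldl_add_flatMap (fun c : Int × Int => PySem.List.pyRange c.1 (c.2 + 1) 1) _ _
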